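-- pv_equiv track=rewrite | github.com/zssasa/Bioinformatics | Bioinformatics2/week1/OverlapGraph.py | OverlapGraph
-- ===== SOURCE A (Python) =====
-- def OverlapGraph(lines):
-- 	lines = sorted(lines)
-- 	result = []
-- 	for i in range(len(lines)):
-- 		for j in range(len(lines)):
-- 			if lines[i][1:] == lines[j][:-1]:
-- 				result.append((lines[i],lines[j]))
-- 	return result
-- ===== SOURCE B (Python) =====
-- def OverlapGraph(lines):
--     lines = sorted(lines)
--     index = {}
--     for y in lines:
--         index[y[:-1]] = index.get(y[:-1], []) + [y]
--     result = []
--     for x in lines: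
--         for y in index.get(x[1:], []):
--             result.append((x, y))
--     return result
-- ===== Notes on version B (the rewrite author's own statement) =====
-- stated objective: faster
-- what changed: Replaces the inner O(n) scan over all reads with a dictionary built once that groups the sorted reads by their length-minus-one prefix, so each read's suffix is a single hash lookup.
import Mathlib
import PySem

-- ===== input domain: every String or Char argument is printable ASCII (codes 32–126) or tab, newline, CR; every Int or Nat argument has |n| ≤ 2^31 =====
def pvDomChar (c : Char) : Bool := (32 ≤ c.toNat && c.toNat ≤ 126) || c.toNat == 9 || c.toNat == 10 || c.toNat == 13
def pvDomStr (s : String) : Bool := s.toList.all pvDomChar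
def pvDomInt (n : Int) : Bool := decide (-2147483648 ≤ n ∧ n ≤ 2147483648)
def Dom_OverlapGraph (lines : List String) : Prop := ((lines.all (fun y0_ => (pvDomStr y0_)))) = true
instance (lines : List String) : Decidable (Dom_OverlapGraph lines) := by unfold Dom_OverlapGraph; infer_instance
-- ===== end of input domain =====

-- B groups the sorted reads by their prefix y[:-1] in a dict built once, so each
-- suffix x[1:] is resolved by one lookup instead of a scan over all reads (faster, asymptotic).

-- ===== PORT A =====
def OverlapGraph (lines : List String) : List (String × String) :=
  let lines := PySem.List.sorted lines (fun x => x) false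
  (PySem.List.pyRange 0 (PySem.List.len lines) 1).foldl (fun result i =>
    (PySem.List.pyRange 0 (PySem.List.len lines) 1).foldl (fun result j =>
      if PySem.Str.slice (PySem.List.pyGetD lines i "") (some 1) none
          = PySem.Str.slice (PySem.List.pyGetD lines j "") none (some (-1))
      then result ++ [(PySem.List.pyGetD lines i "", PySem.List.pyGetD lines j "")]
      else result) result) []

-- ===== PORT B =====
def OverlapGraph_alt (lines : List String) : List (String × String) :=
  let lines := PySem.List.sorted lines (fun x => x) false
  let index := lines.foldl
    (fun d y => d.modify (PySem.Str.slice y none (some (-1))) [] (· ++ [y]))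
    PySem.Dict.empty
  lines.foldl (fun result x =>
    (index.getD (PySem.Str.slice x (some 1) none) []).foldl
      (fun r y => r ++ [(x, y)]) result) []

-- ===== PRECONDITION & SPEC =====
def Spec_OverlapGraph (lines : List String) (out : List (String × String)) : Prop := out = OverlapGraph_alt lines
instance (lines : List String) (out : List (String × String)) : Decidable (Spec_OverlapGraph lines out) := by unfold Spec_OverlapGraph; infer_instance

-- ===== CLAIM (what is proved, stated in full; the proofs are below) =====
def Claim_equal_OverlapGraph : Prop := ∀ (lines : List String), Dom_OverlapGraph lines → Spec_OverlapGraph lines (OverlapGraph lines)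

-- ===== LEMMAS AND PROOFS =====

-- the grouping dict of B: its lookup at key k is exactly the reads whose prefix is k, in order
theorem pvIndex_getD (L : List String) (k : String) :
    (L.foldl (fun d y => d.modify (PySem.Str.slice y none (some (-1))) [] (· ++ [y]))
        PySem.Dict.empty).getD k []
      = L.filter (fun y => PySem.Str.slice y none (some (-1)) == k) := by
  have h := PySem.Dict.getD_foldl_modify_append
    (l := L.map (fun y => (PySem.Str.slice y none (some (-1)), y)))
    (d := PySem.Dict.empty) (c := k)
  rw [List.foldl_map] at h
  simpa [List.filter_map, Function.comp_def] using h

theorem pvA_eq (lines : List String) :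
    OverlapGraph lines = OverlapGraph_alt lines := by
  unfold OverlapGraph OverlapGraph_alt
  simp only [pvIndex_getD, PySem.List.foldl_append_singleton_eq_map]
  generalize PySem.List.sorted lines (fun x => x) false = L
  rw [PySem.List.foldl_pyRange_zero_pyGetD L ""
      (fun acc x => (PySem.List.pyRange 0 (PySem.List.len L) 1).foldl
        (fun result j =>
          if PySem.Str.slice x (some 1) none
              = PySem.Str.slice (PySem.List.pyGetD L j "") none (some (-1))
          then result ++ [(x, PySem.List.pyGetD L j "")] else result) acc) []]
  congr 1
  funext acc x
  rw [PySem.List.foldl_pyRange_zero_pyGetD L ""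
      (fun res y => if PySem.Str.slice x (some 1) none = PySem.Str.slice y none (some (-1))
        then res ++ [(x, y)] else res) acc]
  have hcond : ∀ y : String,
      (PySem.Str.slice x (some 1) none = PySem.Str.slice y none (some (-1)))
        = ((PySem.Str.slice y none (some (-1)) == PySem.Str.slice x (some 1) none) = true) := by
    intro y; rw [eq_iff_iff]; simp only [beq_iff_eq]; exact eq_comm
  simp only [hcond]
  rw [PySem.List.foldl_append_if
    (fun y => PySem.Str.slice y none (some (-1)) == PySem.Str.slice x (some 1) none) (Prod.mk x)]

-- ===== VERDICT (by name: the statement is the Claim_ definition above) =====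
theorem OverlapGraph_spec : Claim_equal_OverlapGraph := by
  intro lines _
  exact pvA_eq lines
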